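-- pv_equiv track=rewrite | github.com/AlexTelon/AdventOfCode | 2019/10/solve.py | is_divisible_by
-- ===== SOURCE A (Python) =====
-- def is_divisible_by(a , b):
--     # check if we by repeating b can build a
--     if b[0] == 0 and b[1] == 0:
--         return a[0] == 0 and b[0] == 0
--
--     x_min = 0
--     x_max = 100
--     if b[0] < 0:
--         x_max = -x_max
--
--     y_min = 0
--     y_max = 100
--     if b[1] < 0:
--         y_max = -y_max
--
--
--     if b[0] == 0:
--         x = 0
--         for y in range(y_min, y_max, b[1]):
--             if a == (x, y):
--                 return True
--         return False
--
--     if b[1] == 0: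
--         y = 0
--         for x in range(x_min, x_max, b[0]):
--             if a == (x, y):
--                 return True
--         return False
--
--     for x, y in zip(range(x_min, x_max, b[0]), range(y_min, y_max, b[1])):
--         if a == (x, y):
--             return True
--
--     return False
-- ===== SOURCE B (Python) =====
-- def is_divisible_by(a, b):
--     # solve directly for the multiplier k instead of enumerating multiples
--     bx, by = b
--     if bx == 0 and by == 0:
--         return a == (0, 0)
--     if bx != 0:
--         if a[0] % bx != 0:
--             return False
--         k = a[0] // bx
--     else:
--         if a[1] % by != 0:
--             return False
--         k = a[1] // by
--     if k < 0:
--         return False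
--     if a != (k * bx, k * by):
--         return False
--     return (bx == 0 or abs(k * bx) < 100) and (by == 0 or abs(k * by) < 100)
-- ===== Notes on version B (the rewrite author's own statement) =====
-- stated objective: simpler
-- what changed: Replaces A's enumeration of up to 100 multiples of b (three separate range/zip scan loops) with a direct O(1) solve for the multiplier k by floor division, checking k>=0, a=(k*bx,k*by) and the range bound |k*bi|<100 for nonzero bi.
-- intended difference: On b=(0,0) with a=(0,y), y!=0, A returns True because its test `a[0]==0 and b[0]==0` never looks at a[1]; B returns False, the intended answer since the only multiple of (0,0) is (0,0) itself. — e.g. on is_divisible_by((0, 1), (0, 0)): A returns true, B returns false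
import Mathlib
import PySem

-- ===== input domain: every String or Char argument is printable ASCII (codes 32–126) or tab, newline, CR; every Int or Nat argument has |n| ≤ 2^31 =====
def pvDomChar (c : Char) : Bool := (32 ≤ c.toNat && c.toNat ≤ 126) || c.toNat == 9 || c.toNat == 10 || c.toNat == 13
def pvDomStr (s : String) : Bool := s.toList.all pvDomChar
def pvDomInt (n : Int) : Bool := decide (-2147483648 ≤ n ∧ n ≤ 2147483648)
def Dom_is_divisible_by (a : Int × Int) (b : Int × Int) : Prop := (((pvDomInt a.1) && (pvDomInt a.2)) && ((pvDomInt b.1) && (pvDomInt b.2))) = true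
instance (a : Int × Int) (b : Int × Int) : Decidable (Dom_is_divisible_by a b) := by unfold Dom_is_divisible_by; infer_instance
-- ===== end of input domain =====

-- B solves directly for the multiplier k by division instead of enumerating all multiples of b;
-- on b = (0,0), a = (0, y) with y ≠ 0 A's test `a[0]==0 and b[0]==0` ignores a[1] and returns True, B returns the intended False (see D_).

-- ===== PORT A =====
def is_divisible_by (a : Int × Int) (b : Int × Int) : Bool :=
  if b.1 = 0 ∧ b.2 = 0 then a.1 == 0 && b.1 == 0
  else
    let xmax : Int := if b.1 < 0 then -100 else 100
    let ymax : Int := if b.2 < 0 then -100 else 100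
    if b.1 = 0 then
      (PySem.List.pyRange 0 ymax b.2).any (fun y => a == (0, y))
    else if b.2 = 0 then
      (PySem.List.pyRange 0 xmax b.1).any (fun x => a == (x, 0))
    else
      ((PySem.List.pyRange 0 xmax b.1).zip (PySem.List.pyRange 0 ymax b.2)).any
        (fun xy => a == (xy.1, xy.2))

-- ===== PORT B =====
def is_divisible_by_alt (a : Int × Int) (b : Int × Int) : Bool :=
  if b.1 = 0 ∧ b.2 = 0 then a == ((0 : Int), (0 : Int))
  else
    let ko : Option Int :=
      if b.1 ≠ 0 then
        if PySem.Int.mod a.1 b.1 ≠ 0 then none else some (PySem.Int.floordiv a.1 b.1)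
      else
        if PySem.Int.mod a.2 b.2 ≠ 0 then none else some (PySem.Int.floordiv a.2 b.2)
    match ko with
    | none => false
    | some k =>
      if k < 0 then false
      else if a ≠ (k * b.1, k * b.2) then false
      else (b.1 == 0 || decide (|k * b.1| < 100)) && (b.2 == 0 || decide (|k * b.2| < 100))

-- ===== PRECONDITION & SPEC =====
-- On b = (0,0) and a = (0, y) with y ≠ 0, A returns True (its test `a[0]==0 and b[0]==0` never looks at a[1]),
-- while B returns False, the intended answer: the only multiple of (0,0) is (0,0) itself.
def D_is_divisible_by (a : Int × Int) (b : Int × Int) : Prop :=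
  a.1 = 0 ∧ a.2 ≠ 0 ∧ |b.1| + |b.2| = 0
instance (a : Int × Int) (b : Int × Int) : Decidable (D_is_divisible_by a b) := by
  unfold D_is_divisible_by; infer_instance

def Spec_is_divisible_by (a : Int × Int) (b : Int × Int) (out : Bool) : Prop :=
  ¬ D_is_divisible_by a b → out = is_divisible_by_alt a b
instance (a : Int × Int) (b : Int × Int) (out : Bool) : Decidable (Spec_is_divisible_by a b out) := by
  unfold Spec_is_divisible_by; infer_instance

def pvDiffWitness_is_divisible_by : (Int × Int) × (Int × Int) := ((0, 1), (0, 0))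
def pvDiffWitnessOut_is_divisible_by : Bool × Bool := (true, false)

-- ===== CLAIM (what is proved, stated in full; the proofs are below) =====
def Claim_unchanged_is_divisible_by : Prop := ∀ (a : Int × Int) (b : Int × Int), Dom_is_divisible_by a b → Spec_is_divisible_by a b (is_divisible_by a b)
def Claim_changed_is_divisible_by : Prop := Dom_is_divisible_by (pvDiffWitness_is_divisible_by.1) (pvDiffWitness_is_divisible_by.2) ∧ D_is_divisible_by (pvDiffWitness_is_divisible_by.1) (pvDiffWitness_is_divisible_by.2) ∧ is_divisible_by (pvDiffWitness_is_divisible_by.1) (pvDiffWitness_is_divisible_by.2) = pvDiffWitnessOut_is_divisible_by.1 ∧ is_divisible_by_alt (pvDiffWitness_is_divisible_by.1) (pvDiffWitness_is_divisible_by.2) = pvDiffWitnessOut_is_divisible_by.2 ∧ pvDiffWitnessOut_is_divisible_by.1 ≠ pvDiffWitnessOut_is_divisible_by.2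
def Claim_exact_is_divisible_by : Prop := ∀ (a : Int × Int) (b : Int × Int), Dom_is_divisible_by a b → D_is_divisible_by a b → is_divisible_by a b ≠ is_divisible_by_alt a b

-- ===== LEMMAS AND PROOFS =====

def pvN (s : Int) : Nat := ((99 + |s|) / |s|).toNat

def pvC (a : Int × Int) (b : Int × Int) : Prop :=
  ∃ k : Nat, a.1 = b.1 * k ∧ a.2 = b.2 * k ∧ (b.1 = 0 ∨ |a.1| < 100) ∧ (b.2 = 0 ∨ |a.2| < 100)

lemma pvRange_eq (s : Int) (hs : s ≠ 0) :
    PySem.List.pyRange 0 (if s < 0 then (-100 : Int) else 100) s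
      = (List.range (pvN s)).map (fun (k : Nat) => s * (k : Int)) := by
  rcases lt_or_gt_of_ne hs with h | h
  · rw [if_pos h, PySem.List.pyRange_of_neg _ _ h, if_pos (by norm_num : (-100:Int) < (0:Int))]
    have h2 : (0 : Int) - -100 + -s - 1 = 99 + -s := by ring
    rw [h2, pvN, abs_of_neg h, Int.ediv_neg]
    simp
  · rw [if_neg (by omega), PySem.List.pyRange_of_pos _ _ h, if_pos (by norm_num : (0:Int) < (100:Int))]
    have h2 : (100 : Int) - 0 + s - 1 = 99 + s := by ring
    rw [h2, pvN, abs_of_pos h]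
    simp

lemma pvBound_iff (s : Int) (hs : s ≠ 0) (k : Nat) : k < pvN s ↔ |s * (k : Int)| < 100 := by
  have ht : (0 : Int) < |s| := abs_pos.mpr hs
  have h1 : |s * (k : Int)| = |s| * k := by
    rw [abs_mul, abs_of_nonneg (by positivity : (0:Int) ≤ (k : Int))]
  rw [h1, pvN, Int.lt_toNat]
  constructor
  · intro hk
    have h3 : ((k:Int) + 1) * |s| ≤ 99 + |s| := (Int.le_ediv_iff_mul_le ht).mp (by omega)
    nlinarith
  · intro hk
    have h3 : ((k:Int) + 1) * |s| ≤ 99 + |s| := by nlinarith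
    have := (Int.le_ediv_iff_mul_le ht).mpr h3
    omega

lemma pvZipRange (n m : Nat) :
    (List.range n).zip (List.range m) = (List.range (min n m)).map (fun i => (i, i)) := by
  apply List.ext_getElem
  · simp
  · intro i h1 h2
    simp [List.getElem_zip]

lemma pvA_iff (a b : Int × Int) (hb : ¬(b.1 = 0 ∧ b.2 = 0)) :
    is_divisible_by a b = true ↔ pvC a b := by
  unfold is_divisible_by
  rw [if_neg hb]
  by_cases hb1 : b.1 = 0
  · have hb2 : b.2 ≠ 0 := fun h => hb ⟨hb1, h⟩
    simp only [if_pos hb1]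
    rw [pvRange_eq b.2 hb2, List.any_map, List.any_eq_true]
    simp only [List.mem_range, Function.comp, beq_iff_eq, Prod.ext_iff]
    constructor
    · rintro ⟨k, hk, h1, h2⟩
      exact ⟨k, by simp [hb1, h1], by simp [h2], Or.inl hb1,
        Or.inr (by rw [h2]; exact (pvBound_iff b.2 hb2 k).mp hk)⟩
    · rintro ⟨k, h1, h2, _, hB2⟩
      have hB2' : |a.2| < 100 := hB2.resolve_left hb2
      refine ⟨k, ?_, by simpa [hb1] using h1, h2.symm ▸ rfl⟩
      · exact (pvBound_iff b.2 hb2 k).mpr (by rw [← h2]; exact hB2')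
  · by_cases hb2 : b.2 = 0
    · simp only [if_neg hb1, if_pos hb2]
      rw [pvRange_eq b.1 hb1, List.any_map, List.any_eq_true]
      simp only [List.mem_range, Function.comp, beq_iff_eq, Prod.ext_iff]
      constructor
      · rintro ⟨k, hk, h1, h2⟩
        exact ⟨k, by simp [h1], by simp [hb2, h2], Or.inr (by rw [h1]; exact (pvBound_iff b.1 hb1 k).mp hk), Or.inl hb2⟩
      · rintro ⟨k, h1, h2, hB1, _⟩
        have hB1' : |a.1| < 100 := hB1.resolve_left hb1
        exact ⟨k, (pvBound_iff b.1 hb1 k).mpr (by rw [← h1]; exact hB1'), h1, by simpa [hb2] using h2⟩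
    · simp only [if_neg hb1, if_neg hb2]
      rw [pvRange_eq b.1 hb1, pvRange_eq b.2 hb2, List.zip_map, pvZipRange, List.map_map, List.any_map, List.any_eq_true]
      simp only [List.mem_range, Function.comp, beq_iff_eq, Prod.ext_iff, Prod.map, Nat.lt_min]
      constructor
      · rintro ⟨k, ⟨hk1, hk2⟩, h1, h2⟩
        exact ⟨k, h1, h2, Or.inr (by rw [h1]; exact (pvBound_iff b.1 hb1 k).mp hk1),
          Or.inr (by rw [h2]; exact (pvBound_iff b.2 hb2 k).mp hk2)⟩
      · rintro ⟨k, h1, h2, hB1, hB2⟩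
        exact ⟨k, ⟨(pvBound_iff b.1 hb1 k).mpr (by rw [← h1]; exact hB1.resolve_left hb1),
          (pvBound_iff b.2 hb2 k).mpr (by rw [← h2]; exact hB2.resolve_left hb2)⟩, h1, h2⟩


lemma pvFloordiv_mul (s c : Int) (hs : s ≠ 0) : PySem.Int.floordiv (s * c) s = c := by
  have hm : PySem.Int.mod (s * c) s = 0 := (PySem.Int.mod_eq_zero_iff_dvd _ _).mpr ⟨c, rfl⟩
  have h := PySem.Int.floordiv_mul_add_mod (s * c) s
  rw [hm, add_zero] at h
  have : PySem.Int.floordiv (s * c) s * s = c * s := by rw [h]; ring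
  exact mul_right_cancel₀ hs this
lemma pvB_iff (a b : Int × Int) (hb : ¬(b.1 = 0 ∧ b.2 = 0)) :
    is_divisible_by_alt a b = true ↔ pvC a b := by
  unfold is_divisible_by_alt
  rw [if_neg hb]
  by_cases hb1 : b.1 = 0
  · have hb2 : b.2 ≠ 0 := fun h => hb ⟨hb1, h⟩
    by_cases hm : PySem.Int.mod a.2 b.2 = 0
    · obtain ⟨c, hc⟩ := (PySem.Int.mod_eq_zero_iff_dvd _ _).mp hm
      have hfd : PySem.Int.floordiv a.2 b.2 = c := by rw [hc]; exact pvFloordiv_mul b.2 c hb2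
      by_cases hneg : c < 0
      · simp only [hb1, hm, hfd]
        simp [hneg]
        intro hC
        obtain ⟨k, h1, h2, -, -⟩ := hC
        have : c = (k : Int) := mul_left_cancel₀ hb2 (by rw [← hc, h2])
        omega
      · by_cases hane : a = ((0 : Int), c * b.2)
        · simp only [hb1, hm, hfd]
          simp [hneg, hane, hb2]
          constructor
          · intro hlt
            refine ⟨c.toNat, by simp [hb1], ?_, Or.inl hb1, Or.inr ?_⟩
            · rw [Int.toNat_of_nonneg (by omega), mul_comm]
            · simpa [abs_mul, mul_comm] using hlt
          · rintro ⟨k, h1, h2, -, hB2⟩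
            simp only [] at h2 hB2
            have habs := hB2.resolve_left hb2
            simpa [abs_mul, mul_comm] using habs
        · simp only [hb1, hm, hfd]
          simp [hneg, hane]
          intro hC
          obtain ⟨k, h1, h2, -, -⟩ := hC
          have hck : c = (k : Int) := mul_left_cancel₀ hb2 (by rw [← hc, h2])
          apply hane
          have e1 : a.1 = (0 : Int) := by simpa [hb1] using h1
          have e2 : a.2 = c * b.2 := by rw [hck, mul_comm, ← h2]
          exact Prod.ext e1 e2
    · simp only [hb1]
      simp [hm]
      intro hC
      obtain ⟨k, h1, h2, -, -⟩ := hC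
      exact hm ((PySem.Int.mod_eq_zero_iff_dvd _ _).mpr ⟨k, h2⟩)
  · by_cases hm : PySem.Int.mod a.1 b.1 = 0
    · obtain ⟨c, hc⟩ := (PySem.Int.mod_eq_zero_iff_dvd _ _).mp hm
      have hfd : PySem.Int.floordiv a.1 b.1 = c := by rw [hc]; exact pvFloordiv_mul b.1 c hb1
      by_cases hneg : c < 0
      · simp only [hm, hfd]
        simp [hneg, hb1]
        intro hC
        obtain ⟨k, h1, h2, -, -⟩ := hC
        have : c = (k : Int) := mul_left_cancel₀ hb1 (by rw [← hc, h1])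
        omega
      · by_cases hane : a = (c * b.1, c * b.2)
        · simp only [hm, hfd]
          simp [hneg, hane, hb1]
          constructor
          · rintro ⟨hlt1, hB2⟩
            refine ⟨c.toNat, ?_, ?_, Or.inr ?_, ?_⟩
            · simp [Int.toNat_of_nonneg (show (0:Int) ≤ c by omega)]; ring
            · simp [Int.toNat_of_nonneg (show (0:Int) ≤ c by omega)]; ring
            · simpa [abs_mul] using hlt1
            · rcases hB2 with h | h
              · exact Or.inl h
              · exact Or.inr (by simpa [abs_mul] using h)
          · rintro ⟨k, h1, h2, hB1, hB2⟩
            simp only [] at h1 h2 hB1 hB2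
            have hck : c = (k : Int) := mul_left_cancel₀ hb1 (by rw [mul_comm c b.1] at h1; exact h1)
            constructor
            · simpa [abs_mul] using hB1.resolve_left hb1
            · rcases hB2 with h | h
              · exact Or.inl h
              · exact Or.inr (by simpa [abs_mul] using h)
        · simp only [hm, hfd]
          simp [hneg, hane, hb1]
          intro hC
          obtain ⟨k, h1, h2, -, -⟩ := hC
          have hck : c = (k : Int) := mul_left_cancel₀ hb1 (by rw [← hc, h1])
          apply hane
          have e1 : a.1 = c * b.1 := by rw [hck, mul_comm, ← h1]
          have e2 : a.2 = c * b.2 := by rw [hck, mul_comm, ← h2]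
          exact Prod.ext e1 e2
    · simp [hm, hb1]
      intro hC
      obtain ⟨k, h1, h2, -, -⟩ := hC
      exact hm ((PySem.Int.mod_eq_zero_iff_dvd _ _).mpr ⟨k, h1⟩)


-- ===== VERDICT (by name: the statement is the Claim_ definition above) =====
theorem is_divisible_by_spec : Claim_unchanged_is_divisible_by := by
  intro a b _ hD
  by_cases hb : b.1 = 0 ∧ b.2 = 0
  · have hbeq : b = ((0:Int), (0:Int)) := Prod.ext hb.1 hb.2
    simp only [is_divisible_by, is_divisible_by_alt, if_pos hb]
    by_cases h1 : a.1 = 0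
    · have h2 : a.2 = 0 := by
        by_contra h2
        exact hD ⟨h1, h2, by simp [hb.1, hb.2]⟩
      have ha : a = ((0:Int), (0:Int)) := Prod.ext h1 h2
      simp [ha, hb.1]
    · have e1 : (a.1 == (0:Int)) = false := by simp [h1]
      have e2 : (a == ((0:Int),(0:Int))) = false := by simp [Prod.ext_iff, h1]
      rw [e1, e2, Bool.false_and]
  · exact Bool.eq_iff_iff.mpr ((pvA_iff a b hb).trans (pvB_iff a b hb).symm)

theorem is_divisible_by_changed : Claim_changed_is_divisible_by := by
  unfold Claim_changed_is_divisible_by; decide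

theorem is_divisible_by_tight : Claim_exact_is_divisible_by := by
  intro a b _ hD
  obtain ⟨h1, h2, hz⟩ := hD
  have hz1 : |b.1| = 0 := by nlinarith [abs_nonneg b.1, abs_nonneg b.2]
  have hz2 : |b.2| = 0 := by nlinarith [abs_nonneg b.1, abs_nonneg b.2]
  rw [abs_eq_zero] at hz1 hz2
  have hbeq : b = ((0:Int), (0:Int)) := Prod.ext hz1 hz2
  have hA : is_divisible_by a b = true := by
    simp [is_divisible_by, hbeq, h1]
  have hB : is_divisible_by_alt a b = false := by
    simp [is_divisible_by_alt, hbeq, Prod.ext_iff, h1, h2]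
  rw [hA, hB]; decide
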